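-- pv_equiv track=rewrite | github.com/Ruban-chris/Interview-Prep-in-Python | elements_of_programming_interviews/15/find-closest-entries-in-three-sorted-arrays.py | find_minimum_range_elements
-- ===== SOURCE A (Python) =====
-- import collections
--
-- Number_with_range_diff = collections.namedtuple('Number_with_range_diff', ('numbers', 'range_difference'))
--
-- def find_minimum_range_elements(A1, A2, A3):
--     p1, p2, p3 = 0, 0, 0
--     numbersWithRangeDiff = Number_with_range_diff([], float('inf'))
--     while p1 <= len(A1) - 1 and p2 <= len(A2) - 1 and p3 <= len(A3) - 1:
--         minEl = min(A1[p1], A2[p2], A3[p3])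
--         maxEl = max(A1[p1], A2[p2], A3[p3])
--         range_difference = abs(maxEl - minEl)
--
--         if range_difference < numbersWithRangeDiff.range_difference:
--             numbersWithRangeDiff = Number_with_range_diff([A1[p1], A2[p2], A3[p3]], range_difference)
--
--         if A1[p1] <= A2[p2] and A1[p1] <= A3[p3]:
--             p1 += 1
--         elif A2[p2] <= A1[p1] and A2[p2] <= A3[p3]:
--             p2 += 1
--         elif A3[p3] <= A2[p2] and A3[p3] <= A1[p1]:
--             p3 += 1
--
--     return numbersWithRangeDiff.numbers
-- ===== SOURCE B (Python) =====
-- _SENTINEL = object()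
--
-- def insert_sorted(entries, e):
--     for k in range(len(entries)):
--         f = entries[k]
--         if (e[0], e[1]) < (f[0], f[1]):
--             return entries[:k] + [e] + entries[k:]
--     return entries + [e]
--
-- def find_minimum_range_elements(A1, A2, A3):
--     if not (A1 and A2 and A3):
--         return []
--     entries = []
--     for i, A in enumerate((A1, A2, A3)):
--         it = iter(A)
--         entries = insert_sorted(entries, (next(it), i, it))
--     best, best_diff = [], None
--     while True:
--         v, i, it = entries[0]
--         diff = entries[-1][0] - v
--         if best_diff is None or diff < best_diff:
--             best_diff = diff
--             best = [w for j in range(3) for (w, k, _) in entries if k == j]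
--         nxt = next(it, _SENTINEL)
--         if nxt is _SENTINEL:
--             return best
--         entries = insert_sorted(entries[1:], (nxt, i, it))
-- ===== Notes on version B (the rewrite author's own statement) =====
-- stated objective: alternative
-- what changed: A re-scans the three current heads for min and max and picks which pointer to advance with an elif chain; B keeps an ordered worklist of (value, array-index, rest) entries so the min is the front, the max is the back, and advancing pops the front and re-inserts that array's next element, rebuilding the triple by index tag.
import Mathlib
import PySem

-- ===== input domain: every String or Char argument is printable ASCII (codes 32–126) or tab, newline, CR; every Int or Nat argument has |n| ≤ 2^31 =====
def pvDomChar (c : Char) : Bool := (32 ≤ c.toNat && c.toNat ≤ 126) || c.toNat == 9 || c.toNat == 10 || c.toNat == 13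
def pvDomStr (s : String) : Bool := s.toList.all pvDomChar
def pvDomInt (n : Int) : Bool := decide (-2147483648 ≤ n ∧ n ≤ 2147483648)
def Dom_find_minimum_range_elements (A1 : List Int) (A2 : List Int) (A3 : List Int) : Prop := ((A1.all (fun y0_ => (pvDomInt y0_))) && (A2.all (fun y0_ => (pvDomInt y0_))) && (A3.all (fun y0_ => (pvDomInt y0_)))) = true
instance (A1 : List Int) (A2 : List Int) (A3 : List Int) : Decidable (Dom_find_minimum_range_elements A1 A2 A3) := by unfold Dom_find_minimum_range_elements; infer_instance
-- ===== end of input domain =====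

-- B replaces A's per-step min/max recomputation and elif pointer chain by an ordered
-- worklist of (value, array-index, rest-of-array) entries: min and max are read off the
-- two ends and advancing pops the front and re-inserts the next element (objective: alternative).

-- ===== PORT A =====
-- A's three index pointers become the three suffix lists; Python's float('inf') initial
-- range_difference is modelled as `none` (compared as +infinity, exactly as in A).
def pvAGo (l1 l2 l3 : List Int) (best : List Int) (bd : Option Int) : List Int :=
  match l1, l2, l3 with
  | a :: t1, b :: t2, c :: t3 =>
    let mn := min a (min b c)
    let mx := max a (max b c)
    let d := |mx - mn|
    let upd : Bool := match bd with | none => true | some x => decide (d < x)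
    let best' := if upd then [a, b, c] else best
    let bd' := if upd then some d else bd
    if a ≤ b ∧ a ≤ c then pvAGo t1 (b :: t2) (c :: t3) best' bd'
    else if b ≤ a ∧ b ≤ c then pvAGo (a :: t1) t2 (c :: t3) best' bd'
    else if c ≤ b ∧ c ≤ a then pvAGo (a :: t1) (b :: t2) t3 best' bd'
    else best'
  | _, _, _ => best
termination_by l1.length + l2.length + l3.length
decreasing_by all_goals simp

def find_minimum_range_elements (A1 : List Int) (A2 : List Int) (A3 : List Int) : List Int :=
  pvAGo A1 A2 A3 [] none

-- ===== PORT B =====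
def pvInsertSorted (entries : List (Int × Int × List Int)) (e : Int × Int × List Int) :
    List (Int × Int × List Int) :=
  match entries with
  | [] => [e]
  | f :: fs =>
    if e.1 < f.1 ∨ (e.1 = f.1 ∧ e.2.1 < f.2.1) then e :: f :: fs else f :: pvInsertSorted fs e

-- measure for pvBGo's termination (cited by its decreasing_by)
def pvRestLen (entries : List (Int × Int × List Int)) : Nat :=
  (entries.map (fun e => e.2.2.length)).sum

theorem pvRestLen_insertSorted (entries : List (Int × Int × List Int)) (e : Int × Int × List Int) :
    pvRestLen (pvInsertSorted entries e) = pvRestLen entries + e.2.2.length := by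
  induction entries with
  | nil => simp [pvInsertSorted, pvRestLen]
  | cons f fs ih =>
    simp only [pvInsertSorted]
    split_ifs <;> simp [pvRestLen] at ih ⊢ <;> omega

def pvBGo (entries : List (Int × Int × List Int)) (best : List Int) (bd : Option Int) : List Int :=
  match entries with
  | [] => best
  | (v, i, rest) :: es =>
    let lastv := (es.getLast?.getD (v, i, rest)).1
    let diff := lastv - v
    let upd : Bool := match bd with | none => true | some x => decide (diff < x)
    let best' := if upd then
        (PySem.List.pyRange 0 3 1).flatMap (fun j =>
          ((v, i, rest) :: es).filterMap (fun f => if f.2.1 = j then some f.1 else none))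
      else best
    let bd' := if upd then some diff else bd
    match rest with
    | [] => best'
    | nxt :: rest' => pvBGo (pvInsertSorted es (nxt, i, rest')) best' bd'
termination_by pvRestLen entries
decreasing_by
  have h := pvRestLen_insertSorted es (nxt, i, rest')
  simp [pvRestLen] at h ⊢; omega

def find_minimum_range_elements_alt (A1 : List Int) (A2 : List Int) (A3 : List Int) : List Int :=
  match A1, A2, A3 with
  | a :: t1, b :: t2, c :: t3 =>
    pvBGo (pvInsertSorted (pvInsertSorted (pvInsertSorted [] (a, 0, t1)) (b, 1, t2)) (c, 2, t3))
      [] none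
  | _, _, _ => []

-- ===== PRECONDITION & SPEC =====
def Spec_find_minimum_range_elements (A1 : List Int) (A2 : List Int) (A3 : List Int) (out : List Int) : Prop := out = find_minimum_range_elements_alt A1 A2 A3
instance (A1 : List Int) (A2 : List Int) (A3 : List Int) (out : List Int) : Decidable (Spec_find_minimum_range_elements A1 A2 A3 out) := by unfold Spec_find_minimum_range_elements; infer_instance

-- ===== CLAIM (what is proved, stated in full; the proofs are below) =====
def Claim_equal_find_minimum_range_elements : Prop := ∀ (A1 : List Int) (A2 : List Int) (A3 : List Int), Dom_find_minimum_range_elements A1 A2 A3 → Spec_find_minimum_range_elements A1 A2 A3 (find_minimum_range_elements A1 A2 A3)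

-- ===== LEMMAS AND PROOFS =====

theorem pvIns3_eq (a b c : Int) (l1 l2 l3 : List Int) :
    pvInsertSorted (pvInsertSorted (pvInsertSorted [] (a, 0, l1)) (b, 1, l2)) (c, 2, l3) =
      if a ≤ b then
        (if c < a then [(c,2,l3),(a,0,l1),(b,1,l2)]
         else if c < b then [(a,0,l1),(c,2,l3),(b,1,l2)]
         else [(a,0,l1),(b,1,l2),(c,2,l3)])
      else
        (if c < b then [(c,2,l3),(b,1,l2),(a,0,l1)]
         else if c < a then [(b,1,l2),(c,2,l3),(a,0,l1)]
         else [(b,1,l2),(a,0,l1),(c,2,l3)]) := by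
  simp only [pvInsertSorted]
  split_ifs <;> (try (simp only [pvInsertSorted]; split_ifs)) <;> first | rfl | (exfalso; omega)


theorem pvInsPair0 (a b c : Int) (l1 l2 l3 : List Int) (h : b ≤ c) :
    pvInsertSorted [(b,1,l2),(c,2,l3)] (a,0,l1) =
    pvInsertSorted (pvInsertSorted (pvInsertSorted [] (a, 0, l1)) (b, 1, l2)) (c, 2, l3) := by
  rw [pvIns3_eq]; simp only [pvInsertSorted]
  split_ifs <;> first | rfl | (exfalso; omega)

theorem pvInsPair0' (a b c : Int) (l1 l2 l3 : List Int) (h : c < b) :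
    pvInsertSorted [(c,2,l3),(b,1,l2)] (a,0,l1) =
    pvInsertSorted (pvInsertSorted (pvInsertSorted [] (a, 0, l1)) (b, 1, l2)) (c, 2, l3) := by
  rw [pvIns3_eq]; simp only [pvInsertSorted]
  split_ifs <;> first | rfl | (exfalso; omega)

theorem pvInsPair1 (a b c : Int) (l1 l2 l3 : List Int) (h : a ≤ c) :
    pvInsertSorted [(a,0,l1),(c,2,l3)] (b,1,l2) =
    pvInsertSorted (pvInsertSorted (pvInsertSorted [] (a, 0, l1)) (b, 1, l2)) (c, 2, l3) := by
  rw [pvIns3_eq]; simp only [pvInsertSorted]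
  split_ifs <;> first | rfl | (exfalso; omega)

theorem pvInsPair1' (a b c : Int) (l1 l2 l3 : List Int) (h : c < a) :
    pvInsertSorted [(c,2,l3),(a,0,l1)] (b,1,l2) =
    pvInsertSorted (pvInsertSorted (pvInsertSorted [] (a, 0, l1)) (b, 1, l2)) (c, 2, l3) := by
  rw [pvIns3_eq]; simp only [pvInsertSorted]
  split_ifs <;> first | rfl | (exfalso; omega)

theorem pvInsPair2 (a b c : Int) (l1 l2 l3 : List Int) (h : a ≤ b) :
    pvInsertSorted [(a,0,l1),(b,1,l2)] (c,2,l3) =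
    pvInsertSorted (pvInsertSorted (pvInsertSorted [] (a, 0, l1)) (b, 1, l2)) (c, 2, l3) := by
  rw [pvIns3_eq]; simp only [pvInsertSorted]
  split_ifs <;> first | rfl | (exfalso; omega)

theorem pvInsPair2' (a b c : Int) (l1 l2 l3 : List Int) (h : ¬ a ≤ b) :
    pvInsertSorted [(b,1,l2),(a,0,l1)] (c,2,l3) =
    pvInsertSorted (pvInsertSorted (pvInsertSorted [] (a, 0, l1)) (b, 1, l2)) (c, 2, l3) := by
  rw [pvIns3_eq]; simp only [pvInsertSorted]
  split_ifs <;> first | rfl | (exfalso; omega)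

theorem pvRange3 : PySem.List.pyRange 0 3 1 = [0, 1, 2] := by decide

theorem pvGo_eq (l1 l2 l3 : List Int) (a b c : Int) (best : List Int) (bd : Option Int) :
    pvBGo (pvInsertSorted (pvInsertSorted (pvInsertSorted [] (a, 0, l1)) (b, 1, l2)) (c, 2, l3))
        best bd
      = pvAGo (a :: l1) (b :: l2) (c :: l3) best bd := by
  rw [pvIns3_eq]
  split_ifs
  · -- c < a <= b
    have hmx : max a (max b c) = b := by omega
    have hmn : min a (min b c) = c := by omega
    have habs : |b - c| = b - c := abs_of_nonneg (by omega)
    rw [pvBGo.eq_def, pvAGo.eq_def]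
    simp only [pvRange3, hmx, hmn, habs]
    simp [(show ¬ (a ≤ c) from by omega), (show ¬ (b ≤ c) from by omega), (show c ≤ b from by omega), (show c ≤ a from by omega)]
    cases l3 with
    | nil => rw [pvAGo.eq_def]
    | cons nxt rest' =>
      simp only []
      rw [pvInsPair2 a b nxt l1 l2 rest' (by omega)]
      exact pvGo_eq l1 l2 rest' a b nxt _ _
  · -- a <= c < b
    have hmx : max a (max b c) = b := by omega
    have hmn : min a (min b c) = a := by omega
    have habs : |b - a| = b - a := abs_of_nonneg (by omega)
    rw [pvBGo.eq_def, pvAGo.eq_def]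
    simp only [pvRange3, hmx, hmn, habs]
    simp [(show a ≤ b from by omega), (show a ≤ c from by omega)]
    cases l1 with
    | nil => rw [pvAGo.eq_def]
    | cons nxt rest' =>
      simp only []
      rw [pvInsPair0' nxt b c rest' l2 l3 (by omega)]
      exact pvGo_eq rest' l2 l3 nxt b c _ _
  · -- a <= b <= c
    have hmx : max a (max b c) = c := by omega
    have hmn : min a (min b c) = a := by omega
    have habs : |c - a| = c - a := abs_of_nonneg (by omega)
    rw [pvBGo.eq_def, pvAGo.eq_def]
    simp only [pvRange3, hmx, hmn, habs]
    simp [(show a ≤ b from by omega), (show a ≤ c from by omega)]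
    cases l1 with
    | nil => rw [pvAGo.eq_def]
    | cons nxt rest' =>
      simp only []
      rw [pvInsPair0 nxt b c rest' l2 l3 (by omega)]
      exact pvGo_eq rest' l2 l3 nxt b c _ _
  · -- c < b < a
    have hmx : max a (max b c) = a := by omega
    have hmn : min a (min b c) = c := by omega
    have habs : |a - c| = a - c := abs_of_nonneg (by omega)
    rw [pvBGo.eq_def, pvAGo.eq_def]
    simp only [pvRange3, hmx, hmn, habs]
    simp [(show ¬ (a ≤ b) from by omega), (show ¬ (b ≤ c) from by omega), (show c ≤ b from by omega), (show c ≤ a from by omega)]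
    cases l3 with
    | nil => rw [pvAGo.eq_def]
    | cons nxt rest' =>
      simp only []
      rw [pvInsPair2' a b nxt l1 l2 rest' (by omega)]
      exact pvGo_eq l1 l2 rest' a b nxt _ _
  · -- b <= c < a
    have hmx : max a (max b c) = a := by omega
    have hmn : min a (min b c) = b := by omega
    have habs : |a - b| = a - b := abs_of_nonneg (by omega)
    rw [pvBGo.eq_def, pvAGo.eq_def]
    simp only [pvRange3, hmx, hmn, habs]
    simp [(show ¬ (a ≤ b) from by omega), (show b ≤ a from by omega), (show b ≤ c from by omega)]
    cases l2 with
    | nil => rw [pvAGo.eq_def]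
    | cons nxt rest' =>
      simp only []
      rw [pvInsPair1' a nxt c l1 rest' l3 (by omega)]
      exact pvGo_eq l1 rest' l3 a nxt c _ _
  · -- b < a <= c
    have hmx : max a (max b c) = c := by omega
    have hmn : min a (min b c) = b := by omega
    have habs : |c - b| = c - b := abs_of_nonneg (by omega)
    rw [pvBGo.eq_def, pvAGo.eq_def]
    simp only [pvRange3, hmx, hmn, habs]
    simp [(show ¬ (a ≤ b) from by omega), (show b ≤ a from by omega), (show b ≤ c from by omega)]
    cases l2 with
    | nil => rw [pvAGo.eq_def]
    | cons nxt rest' =>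
      simp only []
      rw [pvInsPair1 a nxt c l1 rest' l3 (by omega)]
      exact pvGo_eq l1 rest' l3 a nxt c _ _
termination_by l1.length + l2.length + l3.length
decreasing_by all_goals simp

theorem pv_top (A1 A2 A3 : List Int) :
    find_minimum_range_elements A1 A2 A3 = find_minimum_range_elements_alt A1 A2 A3 := by
  unfold find_minimum_range_elements find_minimum_range_elements_alt
  match A1, A2, A3 with
  | [], _, _ => rw [pvAGo.eq_def]
  | _ :: _, [], _ => rw [pvAGo.eq_def]
  | _ :: _, _ :: _, [] => rw [pvAGo.eq_def]
  | a :: t1, b :: t2, c :: t3 => exact (pvGo_eq t1 t2 t3 a b c [] none).symm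

-- ===== VERDICT (by name: the statement is the Claim_ definition above) =====
theorem find_minimum_range_elements_spec : Claim_equal_find_minimum_range_elements := by
  intro A1 A2 A3 _
  unfold Spec_find_minimum_range_elements
  exact pv_top A1 A2 A3
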